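-- pv_equiv track=rewrite | github.com/petermg/spatial-media | spatialmedia/metadata_utils.py | get_spatial_audio_description
-- ===== SOURCE A (Python) =====
-- import collections
--
-- MAX_SUPPORTED_AMBIX_ORDER = 1
--
-- SpatialAudioDescription = collections.namedtuple(
--     'SpatialAudioDescription',
--     'order is_supported has_head_locked_stereo')
--
-- def get_spatial_audio_description(num_channels):
--   for i in range(1, MAX_SUPPORTED_AMBIX_ORDER+1):
--     if (i + 1)*(i + 1) == num_channels:
--       return SpatialAudioDescription(
--           order=i, is_supported=True, has_head_locked_stereo=False)
--     elif ((i + 1)*(i + 1) + 2) == num_channels: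
--       return SpatialAudioDescription(
--           order=i, is_supported=True, has_head_locked_stereo=True)
--
--   return SpatialAudioDescription(
--       order=-1, is_supported=False, has_head_locked_stereo=True)
-- ===== SOURCE B (Python) =====
-- import collections
--
-- MAX_SUPPORTED_AMBIX_ORDER = 1
--
-- SpatialAudioDescription = collections.namedtuple(
--     'SpatialAudioDescription',
--     'order is_supported has_head_locked_stereo')
--
-- # Build a channel-count -> description table once; the answer is one lookup.
-- _TABLE = {}
-- for _order in range(1, MAX_SUPPORTED_AMBIX_ORDER + 1):
--     _n = (_order + 1) * (_order + 1)
--     _TABLE.setdefault(_n, SpatialAudioDescription(_order, True, False))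
--     _TABLE.setdefault(_n + 2, SpatialAudioDescription(_order, True, True))
--
-- def get_spatial_audio_description(num_channels):
--     return _TABLE.get(num_channels,
--                       SpatialAudioDescription(-1, False, True))
-- ===== Notes on version B (the rewrite author's own statement) =====
-- stated objective: idiomatic
-- what changed: Replaces the per-call loop over candidate ambisonic orders with a precomputed channel-count -> description dictionary built once at module load, so the function body is a single dict lookup with a default.
import Mathlib
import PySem

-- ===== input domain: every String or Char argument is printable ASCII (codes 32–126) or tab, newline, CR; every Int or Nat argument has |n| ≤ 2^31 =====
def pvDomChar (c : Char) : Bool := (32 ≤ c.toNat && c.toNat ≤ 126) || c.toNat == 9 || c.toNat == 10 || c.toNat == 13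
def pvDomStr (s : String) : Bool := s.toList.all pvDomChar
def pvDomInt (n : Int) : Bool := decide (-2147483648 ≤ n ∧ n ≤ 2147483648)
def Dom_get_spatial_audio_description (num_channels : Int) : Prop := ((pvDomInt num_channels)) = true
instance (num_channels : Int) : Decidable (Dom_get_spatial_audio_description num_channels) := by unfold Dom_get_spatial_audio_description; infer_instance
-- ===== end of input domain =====

-- B replaces the per-call loop over orders by a precomputed lookup table (idiomatic; same cost at this constant).
-- ===== PORT A =====
def pvLoopA : List Int → Int → Int × Bool × Bool
  | [], _ => (-1, false, true)
  | i :: rest, num_channels =>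
      if (i + 1) * (i + 1) == num_channels then (i, true, false)
      else if (i + 1) * (i + 1) + 2 == num_channels then (i, true, true)
      else pvLoopA rest num_channels

def get_spatial_audio_description (num_channels : Int) : Int × Bool × Bool :=
  pvLoopA (PySem.List.pyRange 1 (1 + 1) 1) num_channels

-- ===== PORT B =====
-- table built once by folding setdefault over the orders, exactly as Source B does
def pvTableB : PySem.Dict Int (Int × Bool × Bool) :=
  (PySem.List.pyRange 1 (1 + 1) 1).foldl
    (fun d o =>
      let n := (o + 1) * (o + 1)
      let d := if (d.get? n).isSome then d else d.insert n (o, true, false)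
      if (d.get? (n + 2)).isSome then d else d.insert (n + 2) (o, true, true))
    (PySem.Dict.empty)

def get_spatial_audio_description_alt (num_channels : Int) : Int × Bool × Bool :=
  pvTableB.getD num_channels (-1, false, true)

-- ===== PRECONDITION & SPEC =====
def Spec_get_spatial_audio_description (num_channels : Int) (out : Int × Bool × Bool) : Prop := out = get_spatial_audio_description_alt num_channels
instance (num_channels : Int) (out : Int × Bool × Bool) : Decidable (Spec_get_spatial_audio_description num_channels out) := by unfold Spec_get_spatial_audio_description; infer_instance

-- ===== CLAIM (what is proved, stated in full; the proofs are below) =====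
def Claim_equal_get_spatial_audio_description : Prop := ∀ (num_channels : Int), Dom_get_spatial_audio_description num_channels → Spec_get_spatial_audio_description num_channels (get_spatial_audio_description num_channels)

-- ===== LEMMAS AND PROOFS =====
theorem pvTableB_eval : pvTableB = PySem.Dict.mk [(4, (1, true, false)), (6, (1, true, true))] := by
  decide

theorem pvRangeA_eval : PySem.List.pyRange 1 (1 + 1) 1 = [1] := by decide

-- ===== VERDICT (by name: the statement is the Claim_ definition above) =====
theorem get_spatial_audio_description_spec : Claim_equal_get_spatial_audio_description := by
  intro n _
  unfold Spec_get_spatial_audio_description get_spatial_audio_description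
    get_spatial_audio_description_alt
  rw [pvTableB_eval, pvRangeA_eval]
  by_cases h4 : n = 4
  · subst h4; decide
  · by_cases h6 : n = 6
    · subst h6; decide
    · simp [pvLoopA, PySem.Dict.getD, PySem.Dict.get?, Ne.symm h4, Ne.symm h6]
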